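-- pv_equiv track=rewrite | github.com/sanjaykenn/AdventOfCode | 2018/8/part-2/main.py | get_root_value
-- ===== SOURCE A (Python) =====
-- def get_root_value(nodes):
-- 	nodes = iter(nodes)
-- 	children = next(nodes)
-- 	metadata_count = next(nodes)
-- 	children_values = [get_root_value(nodes) for _ in range(children)]
-- 	metadata = [next(nodes) for _ in range(metadata_count)]
--
-- 	if len(children_values) <= 0:
-- 		return sum(metadata)
-- 	else:
-- 		result = 0
-- 		for m in metadata:
-- 			if 1 <= m <= len(children_values):
-- 				result += children_values[m - 1]
--
-- 		return result
-- ===== SOURCE B (Python) =====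
-- def get_root_value(nodes):
--     it = iter(nodes)
--     stack = [[next(it), next(it), []]]
--     while True:
--         top = stack[-1]
--         if top[0] > 0:
--             top[0] -= 1
--             stack.append([next(it), next(it), []])
--         else:
--             metadata = [next(it) for _ in range(top[1])]
--             cv = top[2]
--             if not cv:
--                 value = sum(metadata)
--             else:
--                 value = sum(cv[x - 1] for x in metadata if 1 <= x <= len(cv))
--             stack.pop()
--             if not stack:
--                 return value
--             stack[-1][2].append(value)
-- ===== Notes on version B (the rewrite author's own statement) =====
-- stated objective: alternative
-- what changed: Replaces the recursive descent over the shared iterator with an iterative single-pass stack machine of (remaining-children, metadata-count, child-values) frames.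
import Mathlib
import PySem

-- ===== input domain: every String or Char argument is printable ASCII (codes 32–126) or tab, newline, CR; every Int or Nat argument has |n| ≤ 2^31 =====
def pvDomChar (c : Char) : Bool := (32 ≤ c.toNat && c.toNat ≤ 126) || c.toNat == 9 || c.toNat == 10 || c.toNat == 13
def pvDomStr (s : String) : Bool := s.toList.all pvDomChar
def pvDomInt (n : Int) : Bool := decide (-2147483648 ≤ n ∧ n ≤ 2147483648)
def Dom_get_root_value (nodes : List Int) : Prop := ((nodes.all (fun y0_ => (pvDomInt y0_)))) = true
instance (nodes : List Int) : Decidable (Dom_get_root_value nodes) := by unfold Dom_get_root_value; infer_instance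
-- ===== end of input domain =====

-- B replaces A's recursion over the shared iterator by an iterative stack machine
-- with the same stream-consumption order; the proved claim is return-value equality
-- on inputs where A's parse does not raise StopIteration.

-- ===== PORT A =====
-- `[next(nodes) for _ in range(n)]`: take n elements, returning (taken, rest); none = StopIteration.
-- (used by both ports: both Pythons read metadata by exactly this comprehension)
def readMeta : Nat → List Int → Option (List Int × List Int)
  | 0, ns => some ([], ns)
  | _ + 1, [] => none
  | n + 1, x :: t =>
    match readMeta n t with
    | some (ms, r) => some (x :: ms, r)
    | none => none

-- A's value computation: `sum(metadata)` if no children, else the bounds-checked foldl.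
def valueA (cvs ms : List Int) : Int :=
  if (cvs.length : Int) ≤ 0 then ms.sum
  else ms.foldl (fun acc m => if 1 ≤ m ∧ m ≤ (cvs.length : Int) then acc + cvs.getD (m - 1).toNat 0 else acc) 0

-- `[get_root_value(nodes) for _ in range(children)]`: parse n children with parser p, threading the rest.
def parseChildrenF (p : List Int → Option (Int × List Int)) : Nat → List Int → Option (List Int × List Int)
  | 0, ns => some ([], ns)
  | n + 1, ns =>
    match p ns with
    | some (v, r) =>
      match parseChildrenF p n r with
      | some (vs, r') => some (v :: vs, r')
      | none => none
    | none => none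

-- A's recursion over the iterator, modeled as a rest-list-threading parser; the fuel only
-- bounds recursion depth (nodes.length + 1 always suffices); none = StopIteration.
def parseA : Nat → List Int → Option (Int × List Int)
  | 0, _ => none
  | f + 1, ns =>
    match ns with
    | c :: mc :: rest =>
      match parseChildrenF (parseA f) c.toNat rest with
      | some (cvs, r) =>
        match readMeta mc.toNat r with
        | some (ms, r') => some (valueA cvs ms, r')
        | none => none
      | none => none
    | _ => none

def get_root_value (nodes : List Int) : Int :=
  match parseA (nodes.length + 1) nodes with
  | some (v, _) => v
  | none => 0

-- ===== PORT B =====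
-- B's value computation: `sum(metadata) if not cv else sum(cv[x-1] for x in metadata if 1 <= x <= len(cv))`.
def valueB (cvs ms : List Int) : Int :=
  if cvs = [] then ms.sum
  else ((ms.filter (fun x => decide (1 ≤ x ∧ x ≤ (cvs.length : Int)))).map
          (fun x => cvs.getD (x - 1).toNat 0)).sum

-- B's while-loop: a frame is (remaining children, metadata count, child values so far);
-- the fuel only bounds loop iterations (nodes.length always suffices); none = StopIteration.
def runB : Nat → List (Int × Int × List Int) → List Int → Option Int
  | 0, _, _ => none
  | _ + 1, [], _ => none
  | f + 1, (rc, mc, vals) :: S, ns =>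
    if rc > 0 then
      match ns with
      | c :: m :: rest => runB f ((c, m, ([] : List Int)) :: (rc - 1, mc, vals) :: S) rest
      | _ => none
    else
      match readMeta mc.toNat ns with
      | some (ms, rest) =>
        match S with
        | [] => some (valueB vals ms)
        | (a, b, vs) :: S' => runB f ((a, b, vs ++ [valueB vals ms]) :: S') rest
      | none => none

def get_root_value_alt (nodes : List Int) : Int :=
  match nodes with
  | c :: m :: rest =>
    match runB nodes.length [(c, m, ([] : List Int))] rest with
    | some v => v
    | none => 0
  | _ => 0

-- ===== PRECONDITION & SPEC =====
-- Pre_: the list starts with a well-formed serialized tree (trailing unread elements are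
-- allowed, as in A); on other inputs both Pythons raise StopIteration. Tree well-formedness
-- is stated independently of both ports, as membership in the grammar
-- `tree ::= c :: m :: tree^(max c 0) ++ metadata^(max m 0)`, checked shape-only:

def skipMeta (n : Nat) (ns : List Int) : Option (List Int) :=
  if n ≤ ns.length then some (ns.drop n) else none

def shapeChildren (p : List Int → Option (List Int)) : Nat → List Int → Option (List Int)
  | 0, ns => some ns
  | n + 1, ns =>
    match p ns with
    | some r => shapeChildren p n r
    | none => none

-- consume one well-formed tree, returning the remainder; the fuel only bounds nesting depth
-- (nodes.length + 1 always suffices, since each level consumes two header elements).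
def treeShape : Nat → List Int → Option (List Int)
  | 0, _ => none
  | f + 1, c :: m :: rest =>
    match shapeChildren (treeShape f) c.toNat rest with
    | some r => skipMeta m.toNat r
    | none => none
  | _ + 1, _ => none

def Pre_get_root_value (nodes : List Int) : Prop :=
  (treeShape (nodes.length + 1) nodes).isSome = true

instance (nodes : List Int) : Decidable (Pre_get_root_value nodes) := by
  unfold Pre_get_root_value; infer_instance

def pvWitness_get_root_value : List Int := [2, 3, 0, 3, 10, 11, 12, 1, 1, 0, 1, 99, 2, 1, 1, 2]

def Spec_get_root_value (nodes : List Int) (out : Int) : Prop := out = get_root_value_alt nodes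
instance (nodes : List Int) (out : Int) : Decidable (Spec_get_root_value nodes out) := by
  unfold Spec_get_root_value; infer_instance

-- ===== CLAIM (what is proved, stated in full; the proofs are below) =====
def Claim_equal_get_root_value : Prop := ∀ (nodes : List Int), Dom_get_root_value nodes → Pre_get_root_value nodes → Spec_get_root_value nodes (get_root_value nodes)

-- ===== LEMMAS AND PROOFS =====

theorem readMeta_length {n : Nat} {ns ms r : List Int} (h : readMeta n ns = some (ms, r)) :
    r.length ≤ ns.length := by
  induction n generalizing ns ms r with
  | zero => simp [readMeta] at h; simp [← h.2]
  | succ n ih =>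
    cases ns with
    | nil => simp [readMeta] at h
    | cons x t =>
      simp only [readMeta] at h
      cases hr : readMeta n t with
      | none => rw [hr] at h; simp at h
      | some p =>
        rw [hr] at h
        obtain ⟨ms', r'⟩ := p
        simp at h
        have := ih hr
        simp [← h.2]
        omega

theorem valueA_eq_valueB (cvs ms : List Int) : valueA cvs ms = valueB cvs ms := by
  unfold valueA valueB
  by_cases hc : cvs = []
  · subst hc; simp
  · have hlen : ¬ ((cvs.length : Int) ≤ 0) := by
      have : 0 < cvs.length := List.length_pos_iff.mpr hc
      omega
    rw [if_neg hlen, if_neg hc]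
    have key : ∀ (l : List Int) (acc : Int),
        l.foldl (fun acc m => if 1 ≤ m ∧ m ≤ (cvs.length : Int) then acc + cvs.getD (m - 1).toNat 0 else acc) acc
        = acc + ((l.filter (fun x => decide (1 ≤ x ∧ x ≤ (cvs.length : Int)))).map
            (fun x => cvs.getD (x - 1).toNat 0)).sum := by
      intro l
      induction l with
      | nil => intro acc; simp
      | cons x t ih =>
        intro acc
        by_cases hx : 1 ≤ x ∧ x ≤ (cvs.length : Int)
        · rw [List.foldl_cons, if_pos hx, ih, List.filter_cons_of_pos (by simp [hx]),
            List.map_cons, List.sum_cons]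
          ring
        · rw [List.foldl_cons, if_neg hx, ih, List.filter_cons_of_neg (by simp [hx])]
    simpa using key ms 0

-- `popStep f S v r`: what B's loop does right after computing value v of the popped frame.
def popStep (f : Nat) (S : List (Int × Int × List Int)) (v : Int) (r : List Int) : Option Int :=
  match S with
  | [] => some v
  | (a, b, vs) :: S' => runB f ((a, b, vs ++ [v]) :: S') r

-- Main simulation lemma: completing one A-frame (parse its remaining children, then its
-- metadata) is exactly what B's stack machine does from the corresponding frame.
theorem simFrame : ∀ (fA : Nat) (rcN : Nat) (ns cvs r : List Int) (mcI : Int) (ms r' : List Int)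
    (vals : List Int) (S : List (Int × Int × List Int)) (rcI : Int),
    parseChildrenF (parseA fA) rcN ns = some (cvs, r) →
    readMeta mcI.toNat r = some (ms, r') →
    rcI.toNat = rcN →
    ∃ k, k + r'.length ≤ ns.length + 1 ∧
      ∀ fB, runB (fB + k) ((rcI, mcI, vals) :: S) ns = popStep fB S (valueB (vals ++ cvs) ms) r' := by
  intro fA
  induction fA with
  | zero =>
    intro rcN ns cvs r mcI ms r' vals S rcI hc hm hrc
    cases rcN with
    | zero =>
      simp [parseChildrenF] at hc
      obtain ⟨h1, h2⟩ := hc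
      subst h1; subst h2
      refine ⟨1, by have := readMeta_length hm; omega, ?_⟩
      intro fB
      have hneg : ¬ (rcI > 0) := by omega
      simp only [runB, hneg, if_false, hm]
      cases S with
      | nil => simp [popStep]
      | cons p S' => obtain ⟨a, b, vs⟩ := p; simp [popStep]
    | succ n => simp [parseChildrenF, parseA] at hc
  | succ g ihg =>
    intro rcN
    induction rcN with
    | zero =>
      intro ns cvs r mcI ms r' vals S rcI hc hm hrc
      simp [parseChildrenF] at hc
      obtain ⟨h1, h2⟩ := hc
      subst h1; subst h2
      refine ⟨1, by have := readMeta_length hm; omega, ?_⟩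
      intro fB
      have hneg : ¬ (rcI > 0) := by omega
      simp only [runB, hneg, if_false, hm]
      cases S with
      | nil => simp [popStep]
      | cons p S' => obtain ⟨a, b, vs⟩ := p; simp [popStep]
    | succ n ihn =>
      intro ns cvs r mcI ms r' vals S rcI hc hm hrc
      -- unpack parseChildrenF (n+1)
      simp only [parseChildrenF] at hc
      cases hp : parseA (g + 1) ns with
      | none => rw [hp] at hc; simp at hc
      | some pv =>
        rw [hp] at hc
        obtain ⟨v1, r1⟩ := pv
        cases hrest : parseChildrenF (parseA (g + 1)) n r1 with
        | none => simp [hrest] at hc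
        | some pr =>
          obtain ⟨vs1, rfin⟩ := pr
          simp [hrest] at hc
          obtain ⟨hcvs, hr⟩ := hc
          subst hr
          -- unpack parseA (g+1) ns
          cases ns with
          | nil => simp [parseA] at hp
          | cons c ns' =>
            cases ns' with
            | nil => simp [parseA] at hp
            | cons m rest =>
              simp only [parseA] at hp
              cases hcc : parseChildrenF (parseA g) c.toNat rest with
              | none => rw [hcc] at hp; simp at hp
              | some pcc =>
                rw [hcc] at hp
                obtain ⟨ccvs, rr⟩ := pcc
                cases hmm : readMeta m.toNat rr with
                | none => simp [hmm] at hp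
                | some pmm =>
                  obtain ⟨mms, r1'⟩ := pmm
                  simp [hmm] at hp
                  obtain ⟨hv1, hr1⟩ := hp
                  rw [hr1] at hmm
                  -- child frame via outer IH
                  obtain ⟨k1, hk1, h1⟩ :=
                    ihg c.toNat rest ccvs rr m mms r1 [] ((rcI - 1, mcI, vals) :: S) c hcc hmm rfl
                  -- remaining siblings via inner IH
                  have hrc' : (rcI - 1).toNat = n := by omega
                  obtain ⟨k2, hk2, h2⟩ :=
                    ihn r1 vs1 rfin mcI ms r' (vals ++ [v1]) S (rcI - 1) hrest hm hrc'
                  refine ⟨k1 + k2 + 1, by simp at hk1 hk2 ⊢; omega, ?_⟩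
                  intro fB
                  have hpos : rcI > 0 := by omega
                  have harith : fB + (k1 + k2 + 1) = ((fB + k2) + k1) + 1 := by omega
                  rw [harith]
                  simp only [runB, hpos, if_true]
                  rw [h1 (fB + k2)]
                  simp only [popStep, List.nil_append]
                  have hv1' : valueB ccvs mms = v1 := by rw [← hv1, valueA_eq_valueB]
                  rw [hv1', h2 fB]
                  have : vals ++ [v1] ++ vs1 = vals ++ cvs := by
                    rw [← hcvs]; simp
                  rw [this]
                  rfl

theorem readMeta_eq (n : Nat) : ∀ ns : List Int,
    readMeta n ns = if n ≤ ns.length then some (ns.take n, ns.drop n) else none := by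
  induction n with
  | zero => intro ns; simp [readMeta]
  | succ n ih =>
    intro ns
    cases ns with
    | nil => simp [readMeta]
    | cons x t =>
      simp only [readMeta, ih t, List.length_cons, List.take_succ_cons, List.drop_succ_cons]
      split_ifs with h1 h2 h2 <;> first | rfl | omega

theorem skipMeta_eq (n : Nat) (ns : List Int) :
    skipMeta n ns = (readMeta n ns).map Prod.snd := by
  rw [readMeta_eq]; unfold skipMeta; split_ifs <;> simp

theorem treeShape_eq : ∀ (f : Nat) (ns : List Int),
    treeShape f ns = (parseA f ns).map Prod.snd := by
  intro f
  induction f with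
  | zero => intro ns; simp [treeShape, parseA]
  | succ g ih =>
    have hch : ∀ (n : Nat) (ns : List Int),
        shapeChildren (treeShape g) n ns = (parseChildrenF (parseA g) n ns).map Prod.snd := by
      intro n
      induction n with
      | zero => intro ns; simp [shapeChildren, parseChildrenF]
      | succ n ihn =>
        intro ns
        simp only [shapeChildren, parseChildrenF, ih ns]
        cases hp : parseA g ns with
        | none => simp
        | some pv =>
          obtain ⟨v, r⟩ := pv
          simp only [Option.map_some]
          rw [ihn r]
          cases hr : parseChildrenF (parseA g) n r with
          | none => simp
          | some pr => obtain ⟨vs, r'⟩ := pr; simp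
    intro ns
    cases ns with
    | nil => simp [treeShape, parseA]
    | cons c t =>
      cases t with
      | nil => simp [treeShape, parseA]
      | cons m rest =>
        simp only [treeShape, parseA, hch]
        cases hc : parseChildrenF (parseA g) c.toNat rest with
        | none => simp
        | some p =>
          obtain ⟨cvs, r⟩ := p
          simp only [Option.map_some, skipMeta_eq]
          cases hm : readMeta m.toNat r with
          | none => simp
          | some q => obtain ⟨ms, r'⟩ := q; simp

-- ===== VERDICT (by name: the statement is the Claim_ definition above) =====
theorem get_root_value_spec : Claim_equal_get_root_value := by
  intro nodes _ hpre
  unfold Spec_get_root_value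
  unfold Pre_get_root_value at hpre
  rw [treeShape_eq] at hpre
  cases hp : parseA (nodes.length + 1) nodes with
  | none => rw [hp] at hpre; simp at hpre
  | some pv =>
    obtain ⟨v, r⟩ := pv
    have hA : get_root_value nodes = v := by unfold get_root_value; rw [hp]
    rw [hA]
    cases nodes with
    | nil => simp [parseA] at hp
    | cons c ns' =>
      cases ns' with
      | nil => simp [parseA] at hp
      | cons m rest =>
        simp only [parseA] at hp
        cases hcc : parseChildrenF (parseA ((c :: m :: rest).length)) c.toNat rest with
        | none => rw [hcc] at hp; simp at hp
        | some pcc =>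
          rw [hcc] at hp
          obtain ⟨cvs, rr⟩ := pcc
          cases hmm : readMeta m.toNat rr with
          | none => simp [hmm] at hp
          | some pmm =>
            obtain ⟨ms, r'⟩ := pmm
            simp [hmm] at hp
            obtain ⟨hv, hr⟩ := hp
            obtain ⟨k, hk, hrun⟩ :=
              simFrame ((c :: m :: rest).length) c.toNat rest cvs rr m ms r' [] [] c hcc hmm rfl
            unfold get_root_value_alt
            simp only [List.length_cons]
            rw [show rest.length + 1 + 1 = (rest.length + 2 - k) + k from by omega]
            rw [hrun (rest.length + 2 - k)]
            simp [popStep, ← hv, valueA_eq_valueB]
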